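-- pv_equiv track=rewrite | github.com/songtov/tech11-be | app/agents/voice_agent.py | _clean_text_for_tts
-- ===== SOURCE A (Python) =====
-- def _clean_text_for_tts(text: str) -> str:
--     """Clean text for better TTS output"""
--     # Remove pause markers
--     cleaned = text.replace("[pause]", "")
--
--     # Remove extra whitespace
--     cleaned = " ".join(cleaned.split())
--
--     # Handle common TTS issues
--     replacements = {
--         "et al": "et al",
--         "i.e.": "that is",
--         "e.g.": "for example",
--         "vs.": "versus",
--         "Fig.": "Figure",
--         "p <": "p less than",
--         "p >": "p greater than",
--         "%": "percent",
--         "&": "and",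
--         "Dr.": "Doctor",
--         "Prof.": "Professor",
--         "Mr.": "Mister",
--         "Ms.": "Miss",
--         "Mrs.": "Misses",
--     }
--
--     for old, new in replacements.items():
--         cleaned = cleaned.replace(old, new)
--
--     return cleaned
-- ===== SOURCE B (Python) =====
-- # Replacement done by partition-and-join (new.join(s.split(old))) with a recursion
-- # over the substitution table, instead of chained str.replace passes.
-- _TTS_TABLE = [
--     ("et al", "et al"), ("i.e.", "that is"), ("e.g.", "for example"),
--     ("vs.", "versus"), ("Fig.", "Figure"), ("p <", "p less than"),
--     ("p >", "p greater than"), ("%", "percent"), ("&", "and"),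
--     ("Dr.", "Doctor"), ("Prof.", "Professor"), ("Mr.", "Mister"),
--     ("Ms.", "Miss"), ("Mrs.", "Misses"),
-- ]
--
--
-- def _sub(s, old, new):
--     return new.join(s.split(old))
--
--
-- def _apply(s, table):
--     if not table:
--         return s
--     old, new = table[0]
--     return _apply(_sub(s, old, new), table[1:])
--
--
-- def _clean_text_for_tts(text: str) -> str:
--     no_pause = _sub(text, "[pause]", "")
--     normalized = " ".join(no_pause.split())
--     return _apply(normalized, _TTS_TABLE)
-- ===== Notes on version B (the rewrite author's own statement) =====
-- stated objective: alternative
-- what changed: Each substitution is done by partitioning the string at the key and joining the pieces with the replacement (new.join(s.split(old))), and the table is consumed by recursion instead of a for-loop of chained str.replace passes.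
import Mathlib
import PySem

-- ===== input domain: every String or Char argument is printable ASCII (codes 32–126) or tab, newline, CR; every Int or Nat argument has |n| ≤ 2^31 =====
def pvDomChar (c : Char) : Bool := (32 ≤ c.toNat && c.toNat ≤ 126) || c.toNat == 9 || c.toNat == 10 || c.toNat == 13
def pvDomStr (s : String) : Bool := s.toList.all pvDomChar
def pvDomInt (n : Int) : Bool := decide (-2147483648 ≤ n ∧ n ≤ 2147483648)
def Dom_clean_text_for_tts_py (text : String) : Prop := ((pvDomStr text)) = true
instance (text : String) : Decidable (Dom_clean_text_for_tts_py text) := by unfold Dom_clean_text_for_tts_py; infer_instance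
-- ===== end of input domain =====

-- B replaces the chain of str.replace passes by partition-and-join substitution
-- (new.join(s.split(old))) recursing over the substitution table (objective: alternative).

-- ===== PORT A =====
def clean_text_for_tts_py (text : String) : String :=
  let cleaned := PySem.Str.replace text "[pause]" ""
  let cleaned2 := PySem.Str.join " " (PySem.Str.split₀ cleaned)
  let replacements : List (String × String) :=
    [("et al", "et al"), ("i.e.", "that is"), ("e.g.", "for example"),
     ("vs.", "versus"), ("Fig.", "Figure"), ("p <", "p less than"),
     ("p >", "p greater than"), ("%", "percent"), ("&", "and"),
     ("Dr.", "Doctor"), ("Prof.", "Professor"), ("Mr.", "Mister"),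
     ("Ms.", "Miss"), ("Mrs.", "Misses")]
  replacements.foldl (fun cleaned p => PySem.Str.replace cleaned p.1 p.2) cleaned2

-- ===== PORT B =====
def ttsTable : List (String × String) :=
  [("et al", "et al"), ("i.e.", "that is"), ("e.g.", "for example"),
   ("vs.", "versus"), ("Fig.", "Figure"), ("p <", "p less than"),
   ("p >", "p greater than"), ("%", "percent"), ("&", "and"),
   ("Dr.", "Doctor"), ("Prof.", "Professor"), ("Mr.", "Mister"),
   ("Ms.", "Miss"), ("Mrs.", "Misses")]

-- new.join(s.split(old)); every separator B passes is a nonempty literal, so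
-- s.split(old) is PySem.Chars.splitOn (exact for sep ≠ "").
def tts_sub (s old new : String) : String :=
  PySem.Str.join new (List.map String.ofList (PySem.Chars.splitOn s.toList old.toList))

def tts_apply : String → List (String × String) → String
  | s, [] => s
  | s, p :: rest => tts_apply (tts_sub s p.1 p.2) rest

def clean_text_for_tts_py_alt (text : String) : String :=
  let noPause := tts_sub text "[pause]" ""
  let normalized := PySem.Str.join " " (PySem.Str.split₀ noPause)
  tts_apply normalized ttsTable

-- ===== PRECONDITION & SPEC =====
def Spec_clean_text_for_tts_py (text : String) (out : String) : Prop := out = clean_text_for_tts_py_alt text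
instance (text : String) (out : String) : Decidable (Spec_clean_text_for_tts_py text out) := by unfold Spec_clean_text_for_tts_py; infer_instance

-- ===== CLAIM (what is proved, stated in full; the proofs are below) =====
def Claim_equal_clean_text_for_tts_py : Prop := ∀ (text : String), Dom_clean_text_for_tts_py text → Spec_clean_text_for_tts_py text (clean_text_for_tts_py text)

-- ===== LEMMAS AND PROOFS =====

-- splitOn.go: the pending accumulator comes out in front.
theorem splitOn_go_acc (sep : List Char) (fuel : Nat) :
    ∀ (l cur : List Char) (acc : List (List Char)),
      PySem.Chars.splitOn.go sep fuel l cur acc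
        = acc.reverse ++ PySem.Chars.splitOn.go sep fuel l cur [] := by
  induction fuel with
  | zero =>
      intro l cur acc
      simp [PySem.Chars.splitOn.go]
  | succ fuel ih =>
      intro l cur acc
      cases l with
      | nil => simp [PySem.Chars.splitOn.go]
      | cons c t =>
          by_cases h : sep.isPrefixOf (c :: t) = true
          · simp only [PySem.Chars.splitOn.go, h, if_true]
            rw [ih _ [] (cur.reverse :: acc), ih _ [] [cur.reverse]]
            simp
          · simp only [PySem.Chars.splitOn.go, h, Bool.false_eq_true, if_false]
            rw [ih t (c :: cur) acc]

-- splitOn.go never returns the empty list of pieces.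
theorem splitOn_go_ne_nil (sep : List Char) (fuel : Nat) :
    ∀ (l cur : List Char), PySem.Chars.splitOn.go sep fuel l cur [] ≠ [] := by
  induction fuel with
  | zero =>
      intro l cur
      simp [PySem.Chars.splitOn.go]
  | succ fuel ih =>
      intro l cur
      cases l with
      | nil => simp [PySem.Chars.splitOn.go]
      | cons c t =>
          by_cases h : sep.isPrefixOf (c :: t) = true
          · simp only [PySem.Chars.splitOn.go, h, if_true]
            rw [splitOn_go_acc]
            simp
          · simp only [PySem.Chars.splitOn.go, h, Bool.false_eq_true, if_false]
            exact ih t (c :: cur)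

-- the current-piece accumulator prepends (reversed) to the joined result.
theorem splitOn_go_join (sep new : List Char) (fuel : Nat) :
    ∀ (l cur : List Char),
      List.intercalate new (PySem.Chars.splitOn.go sep fuel l cur [])
        = cur.reverse ++ List.intercalate new (PySem.Chars.splitOn.go sep fuel l [] []) := by
  induction fuel with
  | zero =>
      intro l cur
      simp [PySem.Chars.splitOn.go, List.intercalate]
  | succ fuel ih =>
      intro l cur
      cases l with
      | nil => simp [PySem.Chars.splitOn.go, List.intercalate]
      | cons c t =>
          by_cases h : sep.isPrefixOf (c :: t) = true
          · simp only [PySem.Chars.splitOn.go, h, if_true, List.reverse_nil]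
            rw [splitOn_go_acc _ _ _ [] [cur.reverse], splitOn_go_acc _ _ _ [] [[]]]
            obtain ⟨r, rs, hr⟩ :=
              List.exists_cons_of_ne_nil (splitOn_go_ne_nil sep fuel (List.drop sep.length (c :: t)) [])
            rw [hr]
            simp [List.intercalate]
          · simp only [PySem.Chars.splitOn.go, h, Bool.false_eq_true, if_false]
            rw [ih t (c :: cur), ih t [c]]
            simp
-- replace.go: the pending accumulator comes out in front.
theorem replace_go_acc (old new : List Char) (fuel : Nat) :
    ∀ (l acc : List Char),
      PySem.Chars.replace.go old new fuel l acc
        = acc.reverse ++ PySem.Chars.replace.go old new fuel l [] := by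
  induction fuel with
  | zero =>
      intro l acc
      simp [PySem.Chars.replace.go]
  | succ fuel ih =>
      intro l acc
      cases l with
      | nil => simp [PySem.Chars.replace.go]
      | cons c t =>
          by_cases h : old.isPrefixOf (c :: t) = true
          · simp only [PySem.Chars.replace.go, h, if_true]
            rw [ih _ (new.reverse ++ acc), ih _ (new.reverse ++ [])]
            simp
          · simp only [PySem.Chars.replace.go, h, Bool.false_eq_true, if_false]
            rw [ih t (c :: acc), ih t [c]]
            simp

-- enough fuel: one more unit changes nothing (sep nonempty).
theorem splitOn_go_fuel (sep : List Char) (hsep : sep ≠ []) (fuel : Nat) :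
    ∀ (l cur : List Char) (acc : List (List Char)), l.length ≤ fuel →
      PySem.Chars.splitOn.go sep (fuel + 1) l cur acc
        = PySem.Chars.splitOn.go sep fuel l cur acc := by
  induction fuel with
  | zero =>
      intro l cur acc hl
      have : l = [] := List.eq_nil_of_length_eq_zero (Nat.le_zero.mp hl)
      subst this
      simp [PySem.Chars.splitOn.go]
  | succ fuel ih =>
      intro l cur acc hl
      cases l with
      | nil => simp [PySem.Chars.splitOn.go]
      | cons c t =>
          by_cases h : sep.isPrefixOf (c :: t) = true
          · simp only [PySem.Chars.splitOn.go, h, if_true]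
            apply ih
            have hpre : sep <+: (c :: t) := List.isPrefixOf_iff_prefix.mp h
            have h1 : 1 ≤ sep.length := by
              cases sep with
              | nil => exact absurd rfl hsep
              | cons a b => simp
            have h2 : sep.length ≤ (c :: t).length := hpre.length_le
            have h3 : (List.drop sep.length (c :: t)).length = (c :: t).length - sep.length := by
              simp
            simp only [List.length_cons] at *
            omega
          · simp only [PySem.Chars.splitOn.go, h, Bool.false_eq_true, if_false]
            apply ih
            simp only [List.length_cons] at hl
            omega

-- core: joining the pieces of splitOn with `new` is replace (same fuel).
theorem splitOn_join_eq_replace_go (old new : List Char) (hold : old ≠ []) (fuel : Nat) :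
    ∀ (l : List Char), l.length ≤ fuel →
      List.intercalate new (PySem.Chars.splitOn.go old fuel l [] [])
        = PySem.Chars.replace.go old new fuel l [] := by
  induction fuel with
  | zero =>
      intro l hl
      have : l = [] := List.eq_nil_of_length_eq_zero (Nat.le_zero.mp hl)
      subst this
      simp [PySem.Chars.splitOn.go, PySem.Chars.replace.go, List.intercalate]
  | succ fuel ih =>
      intro l hl
      cases l with
      | nil => simp [PySem.Chars.splitOn.go, PySem.Chars.replace.go, List.intercalate]
      | cons c t =>
          have hlen : 1 ≤ old.length := by
            cases old with
            | nil => exact absurd rfl hold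
            | cons a b => simp
          by_cases h : old.isPrefixOf (c :: t) = true
          · have hpre : old <+: (c :: t) := List.isPrefixOf_iff_prefix.mp h
            have hdrop : (List.drop old.length (c :: t)).length ≤ fuel := by
              have h2 : old.length ≤ (c :: t).length := hpre.length_le
              simp only [List.length_drop, List.length_cons] at *
              omega
            simp only [PySem.Chars.splitOn.go, PySem.Chars.replace.go, h, if_true,
              List.reverse_nil, List.append_nil]
            rw [splitOn_go_acc _ _ _ [] [[]]]
            obtain ⟨r, rs, hr⟩ :=
              List.exists_cons_of_ne_nil (splitOn_go_ne_nil old fuel (List.drop old.length (c :: t)) [])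
            rw [replace_go_acc]
            rw [← ih _ hdrop, hr]
            simp [List.intercalate]
          · simp only [PySem.Chars.splitOn.go, PySem.Chars.replace.go, h,
              Bool.false_eq_true, if_false]
            rw [splitOn_go_join old new fuel t [c]]
            rw [replace_go_acc old new fuel t [c]]
            rw [ih t (by simp only [List.length_cons] at hl; omega)]

-- new.join(s.split(old)) = s.replace(old, new) for nonempty old, on char lists.
theorem join_splitOn_eq_replace (s old new : List Char) (hold : old ≠ []) :
    PySem.Chars.join new (PySem.Chars.splitOn s old) = PySem.Chars.replace s old new := by
  have hempty : old.isEmpty = false := by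
    cases old with
    | nil => exact absurd rfl hold
    | cons a b => simp
  unfold PySem.Chars.join PySem.Chars.splitOn PySem.Chars.replace
  rw [hempty]
  simp only [Bool.false_eq_true, if_false]
  rw [splitOn_go_fuel old hold s.length s [] [] (le_refl _)]
  exact splitOn_join_eq_replace_go old new hold s.length s (le_refl _)

-- the same fact lifted to Strings: B's substitution is A's str.replace.
theorem tts_sub_eq_replace (s old new : String) (hold : old.toList ≠ []) :
    tts_sub s old new = PySem.Str.replace s old new := by
  unfold tts_sub PySem.Str.join PySem.Str.replace
  rw [List.map_map]
  have : List.map (String.toList ∘ String.ofList) (PySem.Chars.splitOn s.toList old.toList)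
      = PySem.Chars.splitOn s.toList old.toList := by
    simp [Function.comp_def]
  rw [this, join_splitOn_eq_replace _ _ _ hold]

-- B's recursion over the table is A's fold of replaces.
theorem tts_apply_eq_foldl (table : List (String × String)) :
    ∀ (s : String), (∀ p ∈ table, p.1.toList ≠ []) →
      tts_apply s table = table.foldl (fun c p => PySem.Str.replace c p.1 p.2) s := by
  induction table with
  | nil => intro s _; rfl
  | cons p rest ih =>
      intro s hp
      simp only [tts_apply, List.foldl_cons]
      rw [tts_sub_eq_replace s p.1 p.2 (hp p (by simp))]
      exact ih _ (fun q hq => hp q (by simp [hq]))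

-- ===== VERDICT (by name: the statement is the Claim_ definition above) =====
theorem clean_text_for_tts_py_spec : Claim_equal_clean_text_for_tts_py := by
  intro text _
  unfold Spec_clean_text_for_tts_py clean_text_for_tts_py clean_text_for_tts_py_alt
  rw [tts_sub_eq_replace text "[pause]" "" (by decide)]
  rw [tts_apply_eq_foldl ttsTable _ (by decide)]
  rfl
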